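-- pv_equiv track=rewrite | github.com/bassbonestones/sound-first-service | app/musicxml_analyzer.py | compute_capability_bitmask
-- ===== SOURCE A (Python) =====
-- from typing import Dict, List, Set, Tuple, Optional, Any
--
-- def compute_capability_bitmask(capability_ids: List[int]) -> List[int]:
--     """
--     Compute bitmask values for a list of capability IDs.
--
--     Args:
--         capability_ids: List of capability IDs (each has a bit_index 0-511)
--
--     Returns:
--         List of 8 integers representing the 8 mask columns
--     """
--     masks = [0] * 8
--     for cap_id in capability_ids:
--         bucket = cap_id // 64
--         bit_position = cap_id % 64
--         if 0 <= bucket < 8: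
--             masks[bucket] |= (1 << bit_position)
--     return masks
-- ===== SOURCE B (Python) =====
-- def compute_capability_bitmask(capability_ids):
--     """
--     Compute bitmask values for a list of capability IDs.
--
--     Single 512-bit accumulator instead of 8 bucket cells; the 8 64-bit
--     columns are sliced out in a separate shaped pass.
--     """
--     acc = 0
--     for cap_id in capability_ids:
--         if 0 <= cap_id < 512:
--             acc |= 1 << cap_id
--     return [(acc >> (64 * i)) & ((1 << 64) - 1) for i in range(8)]
-- ===== Notes on version B (the rewrite author's own statement) =====
-- stated objective: faster
-- what changed: B accumulates one 512-bit integer (acc |= 1<<cap_id for ids in [0,512)) and extracts the 8 64-bit columns by shift-and-mask in a separate pass, instead of maintaining 8 bucket accumulators updated via cap_id//64 and cap_id%64 inside the loop.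
import Mathlib
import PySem

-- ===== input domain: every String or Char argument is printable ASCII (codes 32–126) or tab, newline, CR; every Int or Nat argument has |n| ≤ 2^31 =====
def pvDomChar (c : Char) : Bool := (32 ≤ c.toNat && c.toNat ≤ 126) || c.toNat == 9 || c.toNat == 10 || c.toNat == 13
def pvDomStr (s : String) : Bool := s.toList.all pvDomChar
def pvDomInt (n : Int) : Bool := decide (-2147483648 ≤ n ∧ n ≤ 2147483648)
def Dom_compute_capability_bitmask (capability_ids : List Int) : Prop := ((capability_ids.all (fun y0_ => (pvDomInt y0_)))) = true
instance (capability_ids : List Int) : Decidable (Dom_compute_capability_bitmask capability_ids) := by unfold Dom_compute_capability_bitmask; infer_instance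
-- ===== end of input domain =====

-- B replaces A's 8 per-bucket accumulators by one 512-bit accumulator and slices out
-- the 8 64-bit columns in a separate pass (less per-element work: no //, %, or list update).


-- ===== PORT A =====
-- for cap_id: bucket = cap_id // 64; bit = cap_id % 64; if 0 <= bucket < 8: masks[bucket] |= 1 << bit
-- (inside the branch bucket ∈ [0,8) and bit ∈ [0,64), so .toNat is exact there)
def compute_capability_bitmask (capability_ids : List Int) : List Int :=
  capability_ids.foldl
    (fun masks cap_id =>
      let bucket := PySem.Int.floordiv cap_id 64
      let bit_position := PySem.Int.mod cap_id 64
      if 0 ≤ bucket ∧ bucket < 8 then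
        masks.set bucket.toNat
          (PySem.Int.bor (masks.getD bucket.toNat 0) ((1 : Int) <<< bit_position.toNat))
      else masks)
    [0, 0, 0, 0, 0, 0, 0, 0]

-- ===== PORT B =====
-- acc |= 1 << cap_id for 0 <= cap_id < 512; then [(acc >> 64*i) & (2^64-1) for i in range(8)]
def compute_capability_bitmask_alt (capability_ids : List Int) : List Int :=
  let acc := capability_ids.foldl
    (fun acc (cap_id : Int) =>
      if 0 ≤ cap_id ∧ cap_id < 512 then PySem.Int.bor acc ((1 : Int) <<< cap_id.toNat)
      else acc) 0
  (List.range 8).map (fun (i : Nat) => PySem.Int.band (acc >>> (64 * i)) (((1 : Int) <<< 64) - 1))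

-- ===== PRECONDITION & SPEC =====
def Spec_compute_capability_bitmask (capability_ids : List Int) (out : List Int) : Prop := out = compute_capability_bitmask_alt capability_ids
instance (capability_ids : List Int) (out : List Int) : Decidable (Spec_compute_capability_bitmask capability_ids out) := by unfold Spec_compute_capability_bitmask; infer_instance

-- ===== CLAIM (what is proved, stated in full; the proofs are below) =====
def Claim_equal_compute_capability_bitmask : Prop := ∀ (capability_ids : List Int), Dom_compute_capability_bitmask capability_ids → Spec_compute_capability_bitmask capability_ids (compute_capability_bitmask capability_ids)

-- ===== LEMMAS AND PROOFS =====

-- Nat.testBit 1 k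
theorem pv_tb1 (k : Nat) : Nat.testBit 1 k = decide (k = 0) := by
  cases k with
  | zero => rfl
  | succ n => simp [Nat.testBit_succ]

-- testBit of the 64-bit all-ones mask
theorem pv_tbM (j : Nat) : Nat.testBit 18446744073709551615 j = decide (j < 64) := by
  have h : (18446744073709551615 : Nat) = 2 ^ 64 - 1 := by norm_num
  rw [h, Nat.testBit_two_pow_sub_one]

-- column i of a Nat accumulator
def pv_ncol (a i : Nat) : Nat := (a >>> (64 * i)) &&& ((1 <<< 64) - 1)

-- setting bit c of the accumulator changes exactly column c/64, at bit c%64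
theorem pv_key (a c i : Nat) :
    pv_ncol (a ||| 1 <<< c) i =
      if c / 64 = i then pv_ncol a i ||| 1 <<< (c % 64) else pv_ncol a i := by
  split <;> rename_i h <;> apply Nat.eq_of_testBit_eq <;> intro j <;>
    simp [pv_ncol, Nat.testBit_shiftRight, Nat.testBit_shiftLeft, pv_tbM, pv_tb1] <;>
    cases hA : a.testBit (64 * i + j) <;> simp [hA] <;>
    (try (rw [Bool.eq_iff_iff]; simp only [Bool.and_eq_true, decide_eq_true_eq])) <;> omega

-- B's Nat-level accumulator step
def pv_nb (a : Nat) (c : Int) : Nat :=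
  if 0 ≤ c ∧ c < 512 then a ||| 1 <<< c.toNat else a

-- the Int list A maintains, expressed as the 8 columns of a Nat accumulator
def pv_cols (a : Nat) : List Int := (List.range 8).map (fun i => ((pv_ncol a i : Nat) : Int))

-- B's Int fold step is the cast of pv_nb
theorem pv_castB (a : Nat) (c : Int) :
    (if 0 ≤ c ∧ c < 512 then PySem.Int.bor (↑a) ((1 : Int) <<< c.toNat) else (↑a : Int)) =
      ((pv_nb a c : Nat) : Int) := by
  unfold pv_nb
  split
  · rw [show ((1 : Int) <<< c.toNat) = ((1 <<< c.toNat : Nat) : Int) from rfl,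
        PySem.Int.bor_natCast]
  · rfl

theorem pv_foldB (ids : List Int) (a : Nat) :
    ids.foldl
      (fun acc (cap_id : Int) =>
        if 0 ≤ cap_id ∧ cap_id < 512 then PySem.Int.bor acc ((1 : Int) <<< cap_id.toNat)
        else acc) (↑a : Int) =
      ((ids.foldl pv_nb a : Nat) : Int) := by
  induction ids generalizing a with
  | nil => rfl
  | cons c t ih => simpa [pv_castB] using ih (pv_nb a c)

-- A's step on the column view equals the column view of B's step
theorem pv_step (a : Nat) (c : Int) :
    (let bucket := PySem.Int.floordiv c 64
     let bit_position := PySem.Int.mod c 64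
     if 0 ≤ bucket ∧ bucket < 8 then
       (pv_cols a).set bucket.toNat
         (PySem.Int.bor ((pv_cols a).getD bucket.toNat 0) ((1 : Int) <<< bit_position.toNat))
     else pv_cols a) = pv_cols (pv_nb a c) := by
  have hdm := PySem.Int.floordiv_mul_add_mod c 64
  have hm0 : 0 ≤ PySem.Int.mod c 64 := PySem.Int.mod_nonneg c (by norm_num)
  have hml : PySem.Int.mod c 64 < 64 := PySem.Int.mod_lt c (by norm_num)
  have hguard : (0 ≤ PySem.Int.floordiv c 64 ∧ PySem.Int.floordiv c 64 < 8) ↔ (0 ≤ c ∧ c < 512) := by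
    omega
  by_cases hin : 0 ≤ c ∧ c < 512
  · have hq : (PySem.Int.floordiv c 64).toNat = c.toNat / 64 := by omega
    have hr : (PySem.Int.mod c 64).toNat = c.toNat % 64 := by omega
    have hq8 : c.toNat / 64 < 8 := by omega
    simp only [hguard, if_pos hin, hq, hr]
    have hget : (pv_cols a).getD (c.toNat / 64) 0 = ((pv_ncol a (c.toNat / 64) : Nat) : Int) := by
      simp [pv_cols, List.getD, hq8]
    rw [hget, show ((1 : Int) <<< (c.toNat % 64)) = ((1 <<< (c.toNat % 64) : Nat) : Int) from rfl,
        PySem.Int.bor_natCast]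
    unfold pv_nb
    rw [if_pos hin]
    apply List.ext_getElem
    · simp [pv_cols]
    · intro i h1 h2
      have hi8 : i < 8 := by simpa [pv_cols] using h2
      rw [List.getElem_set]
      simp only [pv_cols, List.getElem_map, List.getElem_range]
      rw [pv_key a c.toNat i]
      split <;> rename_i hsp
      · rw [hsp]
      · rfl
  · simp only [hguard, if_neg hin]
    unfold pv_nb
    rw [if_neg hin]

theorem pv_foldA (ids : List Int) (a : Nat) :
    ids.foldl
      (fun masks cap_id =>
        let bucket := PySem.Int.floordiv cap_id 64
        let bit_position := PySem.Int.mod cap_id 64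
        if 0 ≤ bucket ∧ bucket < 8 then
          masks.set bucket.toNat
            (PySem.Int.bor (masks.getD bucket.toNat 0) ((1 : Int) <<< bit_position.toNat))
        else masks) (pv_cols a) =
      pv_cols (ids.foldl pv_nb a) := by
  induction ids generalizing a with
  | nil => rfl
  | cons c t ih =>
    simp only [List.foldl_cons]
    rw [pv_step a c]
    exact ih (pv_nb a c)

-- the final column extraction of B is pv_cols of the Nat accumulator
theorem pv_extract (n : Nat) :
    (List.range 8).map
      (fun (i : Nat) => PySem.Int.band (((n : Nat) : Int) >>> (64 * i)) (((1 : Int) <<< 64) - 1)) =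
      pv_cols n := by
  unfold pv_cols
  refine List.map_congr_left fun i _ => ?_
  rw [show (((n : Nat) : Int) >>> (64 * i)) = ((n >>> (64 * i) : Nat) : Int) from rfl,
      show (((1 : Int) <<< 64) - 1) = ((18446744073709551615 : Nat) : Int) from by decide,
      PySem.Int.band_natCast]
  rfl

theorem pv_foldB0 (ids : List Int) :
    ids.foldl
      (fun acc (cap_id : Int) =>
        if 0 ≤ cap_id ∧ cap_id < 512 then PySem.Int.bor acc ((1 : Int) <<< cap_id.toNat)
        else acc) (0 : Int) =
      ((ids.foldl pv_nb 0 : Nat) : Int) := by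
  simpa using pv_foldB ids 0

-- ===== VERDICT (by name: the statement is the Claim_ definition above) =====
theorem compute_capability_bitmask_spec : Claim_equal_compute_capability_bitmask := by
  intro ids _
  unfold Spec_compute_capability_bitmask compute_capability_bitmask compute_capability_bitmask_alt
  rw [show ([0, 0, 0, 0, 0, 0, 0, 0] : List Int) = pv_cols 0 from by decide,
      pv_foldA ids 0]
  simp only [pv_foldB0, pv_extract]
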